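-- pv_equiv track=rewrite | github.com/Dr-Horv/Advent-of-Code-2020 | src/day06/solver.py | solve
-- ===== SOURCE A (Python) =====
-- def solve(data, part_two=False):
--     questions = set()
--     yes_count = 0
--     everyone_count = 0
--     count = dict()
--     people = 0
--
--     for l in data:
--         if len(l) == 0:
--             yes_count += len(questions)
--             everyone_count += len([q for q in questions if people == count[q]])
--             questions = set()
--             count = dict()
--             people = 0
--             continue
--
--         people += 1
--         for c in l:
--             questions.add(c)
--             count[c] = count.get(c, 0) + 1
--
--
--     yes_count += len(questions)
--     everyone_count += len([q for q in questions if people == count[q]])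
--     if not part_two:
--         return yes_count
--     else:
--         return everyone_count
-- ===== SOURCE B (Python) =====
-- def solve(data, part_two=False):
--     # Pass 1: partition the lines into groups separated by empty lines
--     # (the final group has no trailing blank).
--     groups = []
--     cur = []
--     for l in data:
--         if len(l) == 0:
--             groups.append(cur)
--             cur = []
--         else:
--             cur.append(l)
--     groups.append(cur)
--
--     # Pass 2: aggregate each group with one character counter.
--     yes_count = 0
--     everyone_count = 0
--     for g in groups:
--         cnt = {}
--         for line in g:
--             for ch in line:
--                 cnt[ch] = cnt.get(ch, 0) + 1
--         people = len(g)
--         yes_count += len(cnt)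
--         everyone_count += sum(1 for v in cnt.values() if v == people)
--     return everyone_count if part_two else yes_count
-- ===== Notes on version B (the rewrite author's own statement) =====
-- stated objective: alternative
-- what changed: Replaces A's single interleaved loop (reset-at-blank-line with a separate questions set, a count dict and a duplicated flush block after the loop) by a grouping pass followed by a per-group aggregation pass that uses only one counter per group and the group's length as the people count.
import Mathlib
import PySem

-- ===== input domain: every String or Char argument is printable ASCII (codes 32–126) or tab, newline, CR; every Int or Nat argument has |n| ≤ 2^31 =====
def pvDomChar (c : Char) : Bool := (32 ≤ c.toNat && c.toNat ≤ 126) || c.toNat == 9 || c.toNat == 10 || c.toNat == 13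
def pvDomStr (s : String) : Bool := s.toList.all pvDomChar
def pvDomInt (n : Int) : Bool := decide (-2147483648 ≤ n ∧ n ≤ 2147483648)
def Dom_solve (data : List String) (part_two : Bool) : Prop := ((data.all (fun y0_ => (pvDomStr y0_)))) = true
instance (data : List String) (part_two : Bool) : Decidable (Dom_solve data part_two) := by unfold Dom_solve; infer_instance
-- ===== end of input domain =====

-- B replaces A's single interleaved loop (reset at blank lines, duplicated flush after
-- the loop) by a grouping pass followed by a per-group counter aggregation (objective: alternative).

-- ===== PORT A =====
-- A's loop state: (questions, yes_count, everyone_count, count, people).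
def solveStep (st : PySem.Set Char × Int × Int × PySem.Dict Char Int × Int) (l : String) :
    PySem.Set Char × Int × Int × PySem.Dict Char Int × Int :=
  match st with
  | (questions, yes, everyone, count, people) =>
    if PySem.Str.len l = 0 then
      -- flush: yes += len(questions); everyone += len([q for q in questions if people == count[q]])
      -- (only the LENGTH of the comprehension is used, so the set's hash order is irrelevant;
      --  count[q] never raises since every q ∈ questions is a key of count, so getD is exact)
      (PySem.Set.empty,
       yes + (questions.length : Int),
       everyone + ((questions.filter (fun q => decide (people = count.getD q 0))).length : Int),
       PySem.Dict.empty, 0)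
    else
      -- people += 1; for c in l: questions.add(c); count[c] = count.get(c, 0) + 1
      let qc := l.toList.foldl
        (fun (p : PySem.Set Char × PySem.Dict Char Int) c =>
          (PySem.Set.add p.1 c, p.2.insert c (p.2.getD c 0 + 1)))
        (questions, count)
      (qc.1, yes, everyone, qc.2, people + 1)

def solve (data : List String) (part_two : Bool) : Int :=
  match data.foldl solveStep (PySem.Set.empty, 0, 0, PySem.Dict.empty, 0) with
  | (questions, yes, everyone, count, people) =>
    let yes' := yes + (questions.length : Int)
    let everyone' := everyone + ((questions.filter (fun q => decide (people = count.getD q 0))).length : Int)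
    if !part_two then yes' else everyone'

-- ===== PORT B =====
-- grouping pass: (groups so far, current group)
def groupStep (st : List (List String) × List String) (l : String) :
    List (List String) × List String :=
  if PySem.Str.len l = 0 then (st.1 ++ [st.2], []) else (st.1, st.2 ++ [l])

-- per-group counter: for line in g: for ch in line: cnt[ch] = cnt.get(ch, 0) + 1
def groupCounter (g : List String) : PySem.Dict Char Int :=
  g.foldl
    (fun d line => line.toList.foldl (fun d c => d.insert c (d.getD c 0 + 1)) d)
    PySem.Dict.empty

def solve_alt (data : List String) (part_two : Bool) : Int :=
  let gc := data.foldl groupStep ([], [])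
  let groups := gc.1 ++ [gc.2]
  let ye := groups.foldl
    (fun (acc : Int × Int) g =>
      let cnt := groupCounter g
      let people : Int := (g.length : Int)
      (acc.1 + (cnt.size : Int),
       acc.2 + ((cnt.values.filter (fun v => v == people)).length : Int)))
    (0, 0)
  if part_two then ye.2 else ye.1

-- ===== PRECONDITION & SPEC =====
def Spec_solve (data : List String) (part_two : Bool) (out : Int) : Prop := out = solve_alt data part_two
instance (data : List String) (part_two : Bool) (out : Int) : Decidable (Spec_solve data part_two out) := by unfold Spec_solve; infer_instance

-- ===== CLAIM (what is proved, stated in full; the proofs are below) =====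
def Claim_equal_solve : Prop := ∀ (data : List String) (part_two : Bool), Dom_solve data part_two → Spec_solve data part_two (solve data part_two)

-- ===== LEMMAS AND PROOFS =====

-- all characters of a group, in order
def grpChars (g : List String) : List Char := g.flatMap String.toList

-- the groups / final current group produced by B's grouping pass, recursively
def bGroups (cur : List String) : List String → List (List String)
  | [] => []
  | l :: rest => if PySem.Str.len l = 0 then cur :: bGroups [] rest else bGroups (cur ++ [l]) rest

def bCur (cur : List String) : List String → List String
  | [] => cur
  | l :: rest => if PySem.Str.len l = 0 then bCur [] rest else bCur (cur ++ [l]) rest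

-- per-group contribution of B
def contrib (g : List String) : Int × Int :=
  ((((PySem.Dict.counter (grpChars g) : PySem.Dict Char Int).size : Int)),
   ((((PySem.Dict.counter (grpChars g) : PySem.Dict Char Int).values.filter
        (fun v => v == (g.length : Int))).length : Int)))

def addContribs (acc : Int × Int) (gs : List (List String)) : Int × Int :=
  gs.foldl (fun acc g => (acc.1 + (contrib g).1, acc.2 + (contrib g).2)) acc

-- empty-line test of the two ports coincide
lemma len_zero_iff (l : String) : PySem.Str.len l = 0 ↔ l = "" := by
  rw [PySem.Str.len_eq]
  simp

-- one line of counting continues the counter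
lemma dict_line (cs l : List Char) :
    l.foldl (fun d c => d.insert c (d.getD c 0 + 1)) (PySem.Dict.counter cs)
      = PySem.Dict.counter (cs ++ l) := by
  rw [PySem.Dict.counter_eq_foldl, PySem.Dict.counter_eq_foldl, List.foldl_append]
  rfl

lemma groupCounter_gen (g : List String) : ∀ cs : List Char,
    g.foldl (fun d line => line.toList.foldl (fun d c => d.insert c (d.getD c 0 + 1)) d)
        (PySem.Dict.counter cs)
      = PySem.Dict.counter (cs ++ grpChars g) := by
  induction g with
  | nil => intro cs; simp [grpChars]
  | cons line g ih =>
    intro cs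
    simp only [List.foldl_cons, dict_line, ih, grpChars, List.flatMap_cons, List.append_assoc]

lemma groupCounter_eq (g : List String) :
    groupCounter g = PySem.Dict.counter (grpChars g) := by
  have h := groupCounter_gen g []
  simpa [groupCounter] using h

-- group-fold of solve_alt equals addContribs
lemma ye_fold_eq (gs : List (List String)) (acc : Int × Int) :
    gs.foldl
      (fun (acc : Int × Int) g =>
        let cnt := groupCounter g
        let people : Int := (g.length : Int)
        (acc.1 + (cnt.size : Int),
         acc.2 + ((cnt.values.filter (fun v => v == people)).length : Int)))
      acc = addContribs acc gs := by
  unfold addContribs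
  apply PySem.List.foldl_congr_mem
  intro a g _
  simp [groupCounter_eq, contrib]

-- grouping fold equals the recursive description
lemma groupFold_eq (data : List String) : ∀ (gs : List (List String)) (cur : List String),
    data.foldl groupStep (gs, cur) = (gs ++ bGroups cur data, bCur cur data) := by
  induction data with
  | nil => intro gs cur; simp [bGroups, bCur]
  | cons l rest ih =>
    intro gs cur
    by_cases h : l = ""
    · simp [groupStep, bGroups, bCur, h, ih]
    · simp [groupStep, bGroups, bCur, h, ih]

-- per-group contribution facts, matching A's flush with B's counter
lemma flush_yes (cs : List Char) :
    ((PySem.Set.ofList cs).length : Int) = ((PySem.Dict.counter cs : PySem.Dict Char Int).size : Int) := by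
  have h := PySem.Dict.items_counter (xs := cs)
  simp [PySem.Dict.size, h]

lemma flush_everyone (cs : List Char) (p : Int) :
    (((PySem.Set.ofList cs).filter
        (fun q => decide (p = (PySem.Dict.counter cs : PySem.Dict Char Int).getD q 0))).length : Int)
      = (((PySem.Dict.counter cs : PySem.Dict Char Int).values.filter (fun v => v == p)).length : Int) := by
  have hb : ∀ a b : Int, (a == b) = decide (b = a) := fun a b => by
    by_cases h : a = b
    · simp [h]
    · have h' : ¬ b = a := fun hh => h hh.symm
      simp [h, h']
  have hv := PySem.Dict.values_eq_map_keys (d := (PySem.Dict.counter cs : PySem.Dict Char Int))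
    (PySem.Dict.nodup_keys_counter cs) 0
  rw [hv, PySem.Dict.keys_counter, List.filter_map, List.length_map]
  congr 2
  exact List.filter_congr (fun x _ => by rw [Function.comp_apply, hb])

-- A's inner loop extends set and counter by the line's characters
lemma inner_loop_eq (cs : List Char) (l : List Char) :
    l.foldl
      (fun (p : PySem.Set Char × PySem.Dict Char Int) c =>
        (PySem.Set.add p.1 c, p.2.insert c (p.2.getD c 0 + 1)))
      (PySem.Set.ofList cs, PySem.Dict.counter cs)
    = (PySem.Set.ofList (cs ++ l), PySem.Dict.counter (cs ++ l)) := by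
  rw [PySem.List.foldl_prod_mk (f := fun s c => PySem.Set.add s c)
      (g := fun d c => PySem.Dict.insert d c (d.getD c 0 + 1))]
  congr 1
  · rw [PySem.Set.ofList_append]; rfl
  · exact dict_line cs l

-- main invariant: A's fold from the state of a partial group equals B's description
lemma main_inv (data : List String) : ∀ (cur : List String) (y e : Int),
    data.foldl solveStep
      (PySem.Set.ofList (grpChars cur), y, e, PySem.Dict.counter (grpChars cur), (cur.length : Int))
    = (PySem.Set.ofList (grpChars (bCur cur data)),
       (addContribs (y, e) (bGroups cur data)).1,
       (addContribs (y, e) (bGroups cur data)).2,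
       PySem.Dict.counter (grpChars (bCur cur data)),
       ((bCur cur data).length : Int)) := by
  induction data with
  | nil => intro cur y e; simp [bGroups, bCur, addContribs]
  | cons l rest ih =>
    intro cur y e
    by_cases h : PySem.Str.len l = 0
    · simp only [List.foldl_cons, solveStep, h, if_true, bGroups, bCur]
      rw [flush_yes, flush_everyone]
      have h0 : (PySem.Set.empty : PySem.Set Char) = PySem.Set.ofList (grpChars []) := rfl
      have h1 : (PySem.Dict.empty : PySem.Dict Char Int) = PySem.Dict.counter (grpChars []) := rfl
      have h2 : (0 : Int) = (([] : List String).length : Int) := rfl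
      rw [h0, h1, h2, ih []]
      rfl
    · simp only [List.foldl_cons, solveStep, h, if_false]
      rw [inner_loop_eq]
      have hc : grpChars cur ++ l.toList = grpChars (cur ++ [l]) := by
        simp [grpChars]
      have hl : ((cur.length : Int) + 1) = ((cur ++ [l]).length : Int) := by
        simp
      have hne : ¬ l = "" := fun he => h ((len_zero_iff l).mpr he)
      rw [hc, hl, ih (cur ++ [l])]
      simp [bGroups, bCur, hne]

-- ===== VERDICT (by name: the statement is the Claim_ definition above) =====
theorem solve_spec : Claim_equal_solve := by
  intro data part_two _
  unfold Spec_solve solve solve_alt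
  have hinit : ((PySem.Set.empty : PySem.Set Char), (0 : Int), (0 : Int),
      (PySem.Dict.empty : PySem.Dict Char Int), (0 : Int))
      = (PySem.Set.ofList (grpChars []), (0 : Int), (0 : Int),
         PySem.Dict.counter (grpChars []), (([] : List String).length : Int)) := rfl
  rw [hinit, main_inv data [], groupFold_eq data [] []]
  have happ : addContribs (0, 0) ((bGroups [] data) ++ [bCur [] data])
      = ((addContribs (0, 0) (bGroups [] data)).1 + (contrib (bCur [] data)).1,
         (addContribs (0, 0) (bGroups [] data)).2 + (contrib (bCur [] data)).2) := by
    simp [addContribs, List.foldl_append]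
  simp only [ye_fold_eq, List.nil_append, happ, flush_yes, flush_everyone]
  cases part_two <;> simp [contrib]
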